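-- pv_equiv track=rewrite | github.com/MoraHol/dataStructure-course | PycharmProjects/Fundamentos-estruc-datos/InteriorRombo/InteriorRombo/InteriorRombo.py | RomboImpares
-- ===== SOURCE A (Python) =====
-- def inicializacionMatriz(m): ##inicializa la matriz en 0 con el tamaño m
--     matriz = []
--     for x in range(0, m):
--         matriz.append([0] * m)
--
--     return matriz
--
-- def RomboImpares(matriz,m): ## funcion para guardar los valores del interio de un rombo con tamaño impar
--     k = int(matriz.__len__() / 2)
--     u = k - 1
--
--     matriz2 = inicializacionMatriz(m) ##inicializando la matriz para alojar las posiciones dentro del rombo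
--     ## dvidir matriz en 4 y sacando daigonales
--     for i in range(0,k):## aloja la diagonal superior izquerda
--         for j in range(u+1,k):
--             matriz2[i][j] = matriz[i][j]
--         u -= 1
--
--     u = 0
--     for i in range(k,matriz.__len__()): ##aloja la diagonal inferior izquierda
--         for j in range(u,k):
--             matriz2[i][j] = matriz[i][j]
--         u += 1
--
--     u = k + 1
--     for i in range(0,k): ## aloja la diagonal superior derecha
--         for j in range(k,u):
--             matriz2[i][j] = matriz[i][j]
--         u += 1
--
--     u = matriz.__len__()
--     for i in range(k,matriz.__len__()): ##aloja la diagonal inferior derecha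
--         for j in range(k,u):
--             matriz2[i][j] = matriz[i][j]
--         u -= 1
--
--     return matriz2
-- ===== SOURCE B (Python) =====
-- def RomboImpares(matriz, m):  # single pass over rhombus rows: copy the contiguous interior segment of each row
--     n = len(matriz)
--     k = n // 2
--     matriz2 = [[0] * m for _ in range(m)]
--     for i in range(n):
--         if i < k:
--             lo, hi = k - i, k + i
--         else:
--             lo, hi = i - k, n - 1 - i + k
--         for j in range(lo, hi + 1):
--             matriz2[i][j] = matriz[i][j]
--     return matriz2
-- ===== Notes on version B (the rewrite author's own statement) =====
-- stated objective: simpler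
-- what changed: Replaces the four separate quadrant sweeps with marching u-counters by one nested loop that copies, for each row, the single contiguous rhombus segment given by closed-form bounds.
import Mathlib
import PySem

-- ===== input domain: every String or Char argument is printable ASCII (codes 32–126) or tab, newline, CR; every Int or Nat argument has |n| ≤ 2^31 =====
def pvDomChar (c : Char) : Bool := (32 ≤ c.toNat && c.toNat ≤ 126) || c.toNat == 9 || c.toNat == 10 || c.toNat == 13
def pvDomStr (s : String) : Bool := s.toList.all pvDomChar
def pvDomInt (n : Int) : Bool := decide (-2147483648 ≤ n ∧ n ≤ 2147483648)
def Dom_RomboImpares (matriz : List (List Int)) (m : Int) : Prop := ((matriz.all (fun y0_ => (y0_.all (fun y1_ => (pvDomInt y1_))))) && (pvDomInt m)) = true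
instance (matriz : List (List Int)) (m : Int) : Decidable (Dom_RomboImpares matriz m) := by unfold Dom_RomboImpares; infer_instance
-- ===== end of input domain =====

-- B replaces A's four quadrant sweeps (with marching u-counters) by one nested loop copying,
-- per row, the single contiguous rhombus segment given by closed-form bounds (objective: simpler).

-- ===== PORT A =====
-- shared primitives for Python's read `matriz[i][j]` and write `matriz2[i][j] = v`;
-- exact for the nonnegative in-range indices that occur on every input admitted by Pre_
def pvGetCell (src : List (List Int)) (i j : Int) : Int :=
  (src.getD i.toNat []).getD j.toNat 0

def pvSetCell (M : List (List Int)) (i j : Int) (v : Int) : List (List Int) :=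
  M.set i.toNat ((M.getD i.toNat []).set j.toNat v)

def inicializacionMatriz (m : Int) : List (List Int) :=
  (PySem.List.pyRange 0 m 1).foldl (fun acc _ => acc ++ [List.replicate m.toNat 0]) []

def RomboImpares (matriz : List (List Int)) (m : Int) : List (List Int) :=
  let k : Int := PySem.Int.floordiv (matriz.length : Int) 2
  let s1 := (PySem.List.pyRange 0 k 1).foldl
    (fun (st : List (List Int) × Int) i =>
      ((PySem.List.pyRange (st.2 + 1) k 1).foldl
        (fun M j => pvSetCell M i j (pvGetCell matriz i j)) st.1, st.2 - 1))
    (inicializacionMatriz m, k - 1)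
  let s2 := (PySem.List.pyRange k (matriz.length : Int) 1).foldl
    (fun (st : List (List Int) × Int) i =>
      ((PySem.List.pyRange st.2 k 1).foldl
        (fun M j => pvSetCell M i j (pvGetCell matriz i j)) st.1, st.2 + 1))
    (s1.1, 0)
  let s3 := (PySem.List.pyRange 0 k 1).foldl
    (fun (st : List (List Int) × Int) i =>
      ((PySem.List.pyRange k st.2 1).foldl
        (fun M j => pvSetCell M i j (pvGetCell matriz i j)) st.1, st.2 + 1))
    (s2.1, k + 1)
  let s4 := (PySem.List.pyRange k (matriz.length : Int) 1).foldl
    (fun (st : List (List Int) × Int) i =>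
      ((PySem.List.pyRange k st.2 1).foldl
        (fun M j => pvSetCell M i j (pvGetCell matriz i j)) st.1, st.2 - 1))
    (s3.1, (matriz.length : Int))
  s4.1

def RomboImpares_alt (matriz : List (List Int)) (m : Int) : List (List Int) :=
  let n : Int := matriz.length
  let k : Int := PySem.Int.floordiv n 2
  let matriz2 := (PySem.List.pyRange 0 m 1).map (fun _ => List.replicate m.toNat 0)
  (PySem.List.pyRange 0 n 1).foldl
    (fun M i =>
      let lo : Int := if i < k then k - i else i - k
      let hi : Int := if i < k then k + i else n - 1 - i + k
      (PySem.List.pyRange lo (hi + 1) 1).foldl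
        (fun M j => pvSetCell M i j (pvGetCell matriz i j)) M)
    matriz2


-- ===== PRECONDITION & SPEC =====
-- Pre_ holds exactly when the Python A returns (no IndexError): every row i < n receives writes
-- whose largest column index is hi(i), so both row i of matriz2 and row i of matriz must extend past hi(i).
def Pre_RomboImpares (matriz : List (List Int)) (m : Int) : Prop :=
  ∀ i ∈ List.range matriz.length,
    (i : Int) < m ∧
    (if (i : Int) < (matriz.length : Int) / 2
       then ((matriz.length : Int) / 2 + i : Int)
       else ((matriz.length : Int) - 1 - i + (matriz.length : Int) / 2)) < m ∧
    (if (i : Int) < (matriz.length : Int) / 2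
       then ((matriz.length : Int) / 2 + i : Int)
       else ((matriz.length : Int) - 1 - i + (matriz.length : Int) / 2)) < ((matriz.getD i []).length : Int)

instance (matriz : List (List Int)) (m : Int) : Decidable (Pre_RomboImpares matriz m) := by
  unfold Pre_RomboImpares; infer_instance

def pvWitness_RomboImpares : List (List Int) × Int := ([[1,2,3],[4,5,6],[7,8,9]], 3)

def Spec_RomboImpares (matriz : List (List Int)) (m : Int) (out : List (List Int)) : Prop := out = RomboImpares_alt matriz m
instance (matriz : List (List Int)) (m : Int) (out : List (List Int)) : Decidable (Spec_RomboImpares matriz m out) := by unfold Spec_RomboImpares; infer_instance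

-- ===== CLAIM (what is proved, stated in full; the proofs are below) =====
def Claim_equal_RomboImpares : Prop := ∀ (matriz : List (List Int)) (m : Int), Dom_RomboImpares matriz m → Pre_RomboImpares matriz m → Spec_RomboImpares matriz m (RomboImpares matriz m)

-- ===== LEMMAS AND PROOFS =====
-- The proof characterises both programs as a fold of single-cell writes (pvApply) over an explicit
-- coordinate list, computes the resulting matrix cell-wise, and shows the two coordinate lists
-- (A's four quadrant lists pvWA, B's one list pvWB) contain exactly the same pairs.

def pvCell (M : List (List Int)) (i j : Nat) : Int := (M.getD i []).getD j 0

def pvApply (src M : List (List Int)) (ws : List (Int × Int)) : List (List Int) :=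
  ws.foldl (fun M p => pvSetCell M p.1 p.2 (pvGetCell src p.1 p.2)) M

lemma getD_set {α : Type} (d : α) (l : List α) (i j : Nat) (a : α) :
    (l.set i a).getD j d = if i = j ∧ i < l.length then a else l.getD j d := by
  by_cases h : i = j
  · subst h
    by_cases h2 : i < l.length
    · simp [List.getD_eq_getElem?_getD, h2]
    · simp [List.getD_eq_getElem?_getD, h2]
  · simp [List.getD_eq_getElem?_getD, h]

lemma length_pvSetCell (M : List (List Int)) (a b v) :
    (pvSetCell M a b v).length = M.length := by
  simp [pvSetCell]

lemma rowlen_pvSetCell (M : List (List Int)) (a b v) (i : Nat) :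
    ((pvSetCell M a b v).getD i []).length = (M.getD i []).length := by
  unfold pvSetCell
  rw [getD_set]
  split_ifs with h
  · rw [List.length_set, h.1]
  · rfl

lemma cell_pvSetCell (M : List (List Int)) (a b v) (i j : Nat) :
    pvCell (pvSetCell M a b v) i j =
      if i = a.toNat ∧ j = b.toNat ∧ a.toNat < M.length ∧ b.toNat < (M.getD a.toNat []).length
      then v else pvCell M i j := by
  unfold pvCell pvSetCell
  rw [getD_set]
  by_cases h1 : a.toNat = i ∧ a.toNat < M.length
  · rw [if_pos h1]
    obtain ⟨h1a, h1b⟩ := h1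
    subst h1a
    rw [getD_set]
    by_cases h2 : b.toNat = j ∧ b.toNat < (M.getD a.toNat []).length
    · rw [if_pos h2, if_pos ⟨rfl, h2.1.symm, h1b, h2.2⟩]
    · rw [if_neg h2, if_neg]
      rintro ⟨_, hj, _, hb⟩
      exact h2 ⟨hj.symm, hb⟩
  · rw [if_neg h1, if_neg]
    rintro ⟨hi, _, hlen, _⟩
    exact h1 ⟨hi.symm, hi ▸ hlen⟩

lemma pvApply_cons (src M : List (List Int)) (p t) :
    pvApply src M (p :: t) = pvApply src (pvSetCell M p.1 p.2 (pvGetCell src p.1 p.2)) t := rfl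

lemma length_pvApply (src : List (List Int)) : ∀ (ws : List (Int × Int)) (M),
    (pvApply src M ws).length = M.length := by
  intro ws
  induction ws with
  | nil => intro M; rfl
  | cons p t ih => intro M; rw [pvApply_cons, ih, length_pvSetCell]

lemma rowlen_pvApply (src : List (List Int)) : ∀ (ws : List (Int × Int)) (M) (i : Nat),
    ((pvApply src M ws).getD i []).length = (M.getD i []).length := by
  intro ws
  induction ws with
  | nil => intro M i; rfl
  | cons p t ih => intro M i; rw [pvApply_cons, ih, rowlen_pvSetCell]

lemma cell_pvApply (src : List (List Int)) : ∀ (ws : List (Int × Int)) (M),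
    (∀ p ∈ ws, 0 ≤ p.1 ∧ 0 ≤ p.2) → ∀ (i j : Nat),
    pvCell (pvApply src M ws) i j =
      if ((i : Int), (j : Int)) ∈ ws ∧ i < M.length ∧ j < (M.getD i []).length
      then pvCell src i j else pvCell M i j := by
  intro ws
  induction ws with
  | nil =>
    intro M h i j
    simp [pvApply]
  | cons p t ih =>
    intro M h i j
    have hp := h p List.mem_cons_self
    have hp1 : ((p.1.toNat : Int)) = p.1 := Int.toNat_of_nonneg hp.1
    have hp2 : ((p.2.toNat : Int)) = p.2 := Int.toNat_of_nonneg hp.2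
    rw [pvApply_cons, ih _ (fun q hq => h q (List.mem_cons_of_mem _ hq)),
        length_pvSetCell, rowlen_pvSetCell, cell_pvSetCell]
    by_cases hm : ((i : Int), (j : Int)) ∈ t
    · by_cases hr : i < M.length ∧ j < (M.getD i []).length
      · rw [if_pos ⟨hm, hr⟩, if_pos ⟨List.mem_cons_of_mem _ hm, hr⟩]
      · rw [if_neg (fun hc => hr hc.2), if_neg, if_neg (fun hc => hr hc.2)]
        rintro ⟨rfl, rfl, h3, h4⟩
        exact hr ⟨h3, h4⟩
    · by_cases hpij : p = ((i : Int), (j : Int))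
      · -- head write hits the cell
        subst hpij
        simp only [Int.toNat_natCast] at *
        by_cases hr : i < M.length ∧ j < (M.getD i []).length
        · rw [if_neg (fun hc => hm hc.1), if_pos ⟨trivial, trivial, hr.1, hr.2⟩,
              if_pos ⟨List.mem_cons_self, hr⟩]
          simp [pvGetCell, pvCell]
        · rw [if_neg (fun hc => hm hc.1), if_neg, if_neg (fun hc => hr hc.2)]
          rintro ⟨-, -, h3, h4⟩
          exact hr ⟨h3, h4⟩
      · rw [if_neg (fun hc => hm hc.1), if_neg, if_neg]
        · rintro ⟨hc, -⟩
          rcases List.mem_cons.1 hc with hc | hc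
          · exact hpij hc.symm
          · exact hm hc
        · rintro ⟨h1, h2, -, -⟩
          apply hpij
          ext
          · simp; omega
          · simp; omega

lemma matrix_ext (M N : List (List Int))
    (hlen : M.length = N.length)
    (hrow : ∀ i, (M.getD i []).length = (N.getD i []).length)
    (hcell : ∀ i j, pvCell M i j = pvCell N i j) : M = N := by
  apply List.ext_getElem hlen
  intro i h1 h2
  have hri : M.getD i [] = M[i] := List.getD_eq_getElem M [] h1
  have hri' : N.getD i [] = N[i] := List.getD_eq_getElem N [] h2
  apply List.ext_getElem
  · have := hrow i; rwa [hri, hri'] at this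
  · intro j hj1 hj2
    have := hcell i j
    unfold pvCell at this
    rwa [hri, hri', List.getD_eq_getElem _ _ hj1, List.getD_eq_getElem _ _ hj2] at this
lemma pvApply_append (src M : List (List Int)) (ws1 ws2) :
    pvApply src M (ws1 ++ ws2) = pvApply src (pvApply src M ws1) ws2 := by
  unfold pvApply; rw [List.foldl_append]

lemma inner_eq_pvApply (src : List (List Int)) (i a b : Int) (M : List (List Int)) :
    (PySem.List.pyRange a b 1).foldl (fun M j => pvSetCell M i j (pvGetCell src i j)) M
      = pvApply src M ((PySem.List.pyRange a b 1).map (fun j => (i, j))) := by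
  unfold pvApply; rw [List.foldl_map]

lemma foldl_pvApply (src : List (List Int)) (g : Int → List (Int × Int)) :
    ∀ (l : List Int) (M), l.foldl (fun M i => pvApply src M (g i)) M = pvApply src M (l.flatMap g) := by
  intro l
  induction l with
  | nil => intro M; rfl
  | cons x t ih => intro M; rw [List.foldl_cons, List.flatMap_cons, pvApply_append, ih]

lemma loop_state_sub_aux (f : Int → Int → List (List Int) → List (List Int)) :
    ∀ (N : Nat) (a b c : Int) (M : List (List Int)), (b - a).toNat = N →
    ((PySem.List.pyRange a b 1).foldl (fun (st : List (List Int) × Int) i => (f i st.2 st.1, st.2 - 1)) (M, c)).1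
      = (PySem.List.pyRange a b 1).foldl (fun M i => f i (c - (i - a)) M) M := by
  intro N
  induction N with
  | zero =>
    intro a b c M h
    rw [PySem.List.pyRange_one_eq_nil (by omega)]; rfl
  | succ n ih =>
    intro a b c M h
    rw [PySem.List.pyRange_one_cons (by omega), List.foldl_cons, List.foldl_cons,
        ih (a+1) b (c-1) (f a c M) (by omega)]
    have he : (fun (M : List (List Int)) i => f i (c - 1 - (i - (a + 1))) M)
        = (fun M i => f i (c - (i - a)) M) := by
      funext M' i
      have : c - 1 - (i - (a + 1)) = c - (i - a) := by ring
      rw [this]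
    rw [he]
    have h0 : c - (a - a) = c := by ring
    rw [h0]

lemma loop_state_sub (f : Int → Int → List (List Int) → List (List Int)) (a b c : Int) (M : List (List Int)) :
    ((PySem.List.pyRange a b 1).foldl (fun (st : List (List Int) × Int) i => (f i st.2 st.1, st.2 - 1)) (M, c)).1
      = (PySem.List.pyRange a b 1).foldl (fun M i => f i (c - (i - a)) M) M :=
  loop_state_sub_aux f ((b - a).toNat) a b c M rfl

lemma loop_state_add_aux (f : Int → Int → List (List Int) → List (List Int)) :
    ∀ (N : Nat) (a b c : Int) (M : List (List Int)), (b - a).toNat = N →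
    ((PySem.List.pyRange a b 1).foldl (fun (st : List (List Int) × Int) i => (f i st.2 st.1, st.2 + 1)) (M, c)).1
      = (PySem.List.pyRange a b 1).foldl (fun M i => f i (c + (i - a)) M) M := by
  intro N
  induction N with
  | zero =>
    intro a b c M h
    rw [PySem.List.pyRange_one_eq_nil (by omega)]; rfl
  | succ n ih =>
    intro a b c M h
    rw [PySem.List.pyRange_one_cons (by omega), List.foldl_cons, List.foldl_cons,
        ih (a+1) b (c+1) (f a c M) (by omega)]
    have he : (fun (M : List (List Int)) i => f i (c + 1 + (i - (a + 1))) M)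
        = (fun M i => f i (c + (i - a)) M) := by
      funext M' i
      have : c + 1 + (i - (a + 1)) = c + (i - a) := by ring
      rw [this]
    rw [he]
    have h0 : c + (a - a) = c := by ring
    rw [h0]

lemma loop_state_add (f : Int → Int → List (List Int) → List (List Int)) (a b c : Int) (M : List (List Int)) :
    ((PySem.List.pyRange a b 1).foldl (fun (st : List (List Int) × Int) i => (f i st.2 st.1, st.2 + 1)) (M, c)).1
      = (PySem.List.pyRange a b 1).foldl (fun M i => f i (c + (i - a)) M) M :=
  loop_state_add_aux f ((b - a).toNat) a b c M rfl
lemma init_eq (m : Int) :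
    inicializacionMatriz m = (PySem.List.pyRange 0 m 1).map (fun _ => List.replicate m.toNat 0) := by
  unfold inicializacionMatriz
  rw [PySem.List.foldl_append_singleton_eq_map]
  rfl

def pvWA (matriz : List (List Int)) : List (Int × Int) :=
  List.flatMap (fun i => List.map (fun j => (i, j))
      (PySem.List.pyRange ((matriz.length : Int) / 2 - 1 - (i - 0) + 1) ((matriz.length : Int) / 2) 1))
    (PySem.List.pyRange 0 ((matriz.length : Int) / 2) 1) ++
  (List.flatMap (fun i => List.map (fun j => (i, j))
      (PySem.List.pyRange (0 + (i - (matriz.length : Int) / 2)) ((matriz.length : Int) / 2) 1))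
    (PySem.List.pyRange ((matriz.length : Int) / 2) (matriz.length : Int) 1) ++
  (List.flatMap (fun i => List.map (fun j => (i, j))
      (PySem.List.pyRange ((matriz.length : Int) / 2) ((matriz.length : Int) / 2 + 1 + (i - 0)) 1))
    (PySem.List.pyRange 0 ((matriz.length : Int) / 2) 1) ++
  List.flatMap (fun i => List.map (fun j => (i, j))
      (PySem.List.pyRange ((matriz.length : Int) / 2) ((matriz.length : Int) - (i - (matriz.length : Int) / 2)) 1))
    (PySem.List.pyRange ((matriz.length : Int) / 2) (matriz.length : Int) 1)))

def pvWB (matriz : List (List Int)) : List (Int × Int) :=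
  List.flatMap (fun i => List.map (fun j => (i, j))
      (PySem.List.pyRange
        (if i < (matriz.length : Int) / 2 then (matriz.length : Int) / 2 - i else i - (matriz.length : Int) / 2)
        ((if i < (matriz.length : Int) / 2 then (matriz.length : Int) / 2 + i
          else (matriz.length : Int) - 1 - i + (matriz.length : Int) / 2) + 1) 1))
    (PySem.List.pyRange 0 (matriz.length : Int) 1)

lemma nonneg_pvWA (matriz : List (List Int)) : ∀ p ∈ pvWA matriz, 0 ≤ p.1 ∧ 0 ≤ p.2 := by
  intro p hp
  simp only [pvWA, List.mem_append, List.mem_flatMap, List.mem_map, PySem.List.mem_pyRange_one] at hp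
  rcases hp with (⟨i,hi,j,hj,rfl⟩|⟨i,hi,j,hj,rfl⟩|⟨i,hi,j,hj,rfl⟩|⟨i,hi,j,hj,rfl⟩) <;>
    refine ⟨?_, ?_⟩ <;> simp <;> omega

lemma nonneg_pvWB (matriz : List (List Int)) : ∀ p ∈ pvWB matriz, 0 ≤ p.1 ∧ 0 ≤ p.2 := by
  intro p hp
  simp only [pvWB, List.mem_flatMap, List.mem_map, PySem.List.mem_pyRange_one] at hp
  rcases hp with ⟨i,hi,j,hj,rfl⟩
  refine ⟨?_, ?_⟩ <;> simp <;> (try split_ifs at hj) <;> omega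

lemma mem_pvWA_iff {matriz : List (List Int)} (x y : Int) :
    ((x, y) ∈ pvWA matriz) ↔ ((x, y) ∈ pvWB matriz) := by
  simp only [pvWA, pvWB, List.mem_append, List.mem_flatMap, List.mem_map,
    PySem.List.mem_pyRange_one, Prod.mk.injEq]
  constructor
  · rintro (⟨i,hi,j,hj,rfl,rfl⟩|⟨i,hi,j,hj,rfl,rfl⟩|⟨i,hi,j,hj,rfl,rfl⟩|⟨i,hi,j,hj,rfl,rfl⟩) <;>
      exact ⟨i, by omega, j, ⟨by split_ifs <;> omega, by split_ifs <;> omega⟩, rfl, rfl⟩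
  · rintro ⟨i, hi, j, hj, rfl, rfl⟩
    by_cases hik : i < (matriz.length : Int) / 2
    · rw [if_pos hik, if_pos hik] at hj
      by_cases hjk : j < (matriz.length : Int) / 2
      · exact Or.inl ⟨i, ⟨hi.1, hik⟩, j, ⟨by omega, hjk⟩, rfl, rfl⟩
      · exact Or.inr (Or.inr (Or.inl ⟨i, ⟨hi.1, hik⟩, j, ⟨by omega, by omega⟩, rfl, rfl⟩))
    · rw [if_neg hik, if_neg hik] at hj
      by_cases hjk : j < (matriz.length : Int) / 2
      · exact Or.inr (Or.inl ⟨i, ⟨by omega, hi.2⟩, j, ⟨by omega, hjk⟩, rfl, rfl⟩)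
      · exact Or.inr (Or.inr (Or.inr ⟨i, ⟨by omega, hi.2⟩, j, ⟨by omega, by omega⟩, rfl, rfl⟩))

lemma ports_agree (matriz : List (List Int)) (m : Int) :
    RomboImpares matriz m = RomboImpares_alt matriz m := by
  have hfd : PySem.Int.floordiv ((matriz.length : Int)) 2 = (matriz.length : Int) / 2 :=
    PySem.Int.floordiv_eq_ediv_of_pos (by omega)
  simp only [RomboImpares, RomboImpares_alt, hfd]
  rw [loop_state_sub (fun i u M => (PySem.List.pyRange ((matriz.length : Int)/2) u 1).foldl
        (fun M j => pvSetCell M i j (pvGetCell matriz i j)) M)]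
  rw [loop_state_add (fun i u M => (PySem.List.pyRange ((matriz.length : Int)/2) u 1).foldl
        (fun M j => pvSetCell M i j (pvGetCell matriz i j)) M)]
  rw [loop_state_add (fun i u M => (PySem.List.pyRange u ((matriz.length : Int)/2) 1).foldl
        (fun M j => pvSetCell M i j (pvGetCell matriz i j)) M)]
  rw [loop_state_sub (fun i u M => (PySem.List.pyRange (u+1) ((matriz.length : Int)/2) 1).foldl
        (fun M j => pvSetCell M i j (pvGetCell matriz i j)) M)]
  simp only [inner_eq_pvApply]
  rw [foldl_pvApply, foldl_pvApply, foldl_pvApply, foldl_pvApply, foldl_pvApply,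
      ← pvApply_append, ← pvApply_append, ← pvApply_append, init_eq]
  show pvApply matriz ((PySem.List.pyRange 0 m 1).map (fun _ => List.replicate m.toNat 0)) (pvWA matriz)
      = pvApply matriz ((PySem.List.pyRange 0 m 1).map (fun _ => List.replicate m.toNat 0)) (pvWB matriz)
  apply matrix_ext
  · rw [length_pvApply, length_pvApply]
  · intro i; rw [rowlen_pvApply, rowlen_pvApply]
  · intro i j
    rw [cell_pvApply _ _ _ (nonneg_pvWA matriz), cell_pvApply _ _ _ (nonneg_pvWB matriz)]
    simp only [mem_pvWA_iff]

-- ===== VERDICT (by name: the statement is the Claim_ definition above) =====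
theorem RomboImpares_spec : Claim_equal_RomboImpares := by
  intro matriz m _ _
  unfold Spec_RomboImpares
  exact ports_agree matriz m
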